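-- pv_equiv track=rewrite | github.com/Stackpole-International-Stratford/pms2024 | app/plant/views/maintenance_views.py | group_by_role
-- ===== SOURCE A (Python) =====
-- from collections import OrderedDict
--
-- ROLE_ORDER = ["electrician", "millwright", "tech", "plctech", "imt"]
--
-- def group_by_role(workers):
--     """
--     Organize a list of worker records into buckets by their primary role.
--
--     Each worker is expected to be a dict containing at least:
--       - 'roles':   A list of role strings (may be empty).
--       - other keys such as 'username', 'name', etc.
--
--     Workers are assigned to the bucket corresponding to their first-listed role
--     (normalized to lowercase) in the predefined ROLE_ORDER sequence. Any worker
--     whose primary role is not in ROLE_ORDER—or who has no roles—goes into the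
--     `"other"` bucket. The order of buckets in the result follows ROLE_ORDER,
--     with `"other"` appended at the end.
--
--     Parameters
--     ----------
--     workers : list of dict
--         A list of worker dictionaries, each containing a 'roles' key.
--
--     Returns
--     -------
--     collections.OrderedDict
--         An ordered mapping from role keys (each from ROLE_ORDER plus "other")
--         to lists of worker dicts whose primary role matches the key.
--     """
--     """
--     Given a list of worker-dicts (with 'roles' and 'username', 'name', etc.),
--     bucket them by their first-listed role, in the order of ROLE_ORDER.
--     """
--     buckets = OrderedDict((r, []) for r in ROLE_ORDER)
--     buckets["other"] = []
--     for w in workers: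
--         primary = w["roles"][0].lower() if w["roles"] else "other"
--         if primary in buckets:
--             buckets[primary].append(w)
--         else:
--             buckets["other"].append(w)
--     return buckets
-- ===== SOURCE B (Python) =====
-- from collections import OrderedDict
--
-- ROLE_ORDER = ["electrician", "millwright", "tech", "plctech", "imt"]
--
-- def group_by_role(workers):
--     def bucket_key(w):
--         primary = w["roles"][0].lower() if w["roles"] else "other"
--         return primary if primary in ROLE_ORDER else "other"
--     return OrderedDict((k, [w for w in workers if bucket_key(w) == k])
--                        for k in ROLE_ORDER + ["other"])
-- ===== Notes on version B (the rewrite author's own statement) =====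
-- stated objective: alternative
-- what changed: Instead of one dispatch pass that appends each worker into a mutable pre-seeded OrderedDict bucket, B builds each bucket independently as a filtering comprehension over the full worker list, one pass per role key.
import Mathlib
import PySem

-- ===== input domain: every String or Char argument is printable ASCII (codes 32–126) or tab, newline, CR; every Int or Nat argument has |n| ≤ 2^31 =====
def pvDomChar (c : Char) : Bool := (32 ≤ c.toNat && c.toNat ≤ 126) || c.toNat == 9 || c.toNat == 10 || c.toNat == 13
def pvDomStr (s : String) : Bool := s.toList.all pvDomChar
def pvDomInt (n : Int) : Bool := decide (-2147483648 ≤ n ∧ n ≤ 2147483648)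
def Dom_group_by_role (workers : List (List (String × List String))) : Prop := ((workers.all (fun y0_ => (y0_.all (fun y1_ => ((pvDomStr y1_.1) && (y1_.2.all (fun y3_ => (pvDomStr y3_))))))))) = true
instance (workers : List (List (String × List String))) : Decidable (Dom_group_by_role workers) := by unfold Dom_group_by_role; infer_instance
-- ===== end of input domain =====

-- B rebuilds each role bucket as an independent filtering pass over the whole worker list
-- (one pass per key of a pre-seeded OrderedDict) instead of A's single dispatch-and-append pass.


def ROLE_ORDER : List String := ["electrician", "millwright", "tech", "plctech", "imt"]

-- ===== PORT A =====
-- primary = w["roles"][0].lower() if w["roles"] else "other"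
-- (the 'none' case of get? is Python's KeyError, excluded by Pre_; the port returns "other" there)
def primaryA (w : List (String × List String)) : String :=
  match (PySem.Dict.mk w).get? "roles" with
  | some (r :: _) => PySem.Str.lower r
  | _ => "other"

def group_by_role (workers : List (List (String × List String))) : List (String × List (List (String × List String))) :=
  let buckets0 := (PySem.Dict.ofList (ROLE_ORDER.map (fun r => (r, ([] : List (List (String × List String))))))).insert "other" []
  let buckets := workers.foldl (fun b w =>
      let primary := primaryA w
      if b.contains primary then b.modify primary [] (· ++ [w])
      else b.modify "other" [] (· ++ [w])) buckets0
  buckets.items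

-- ===== PORT B =====
def bucketKey (w : List (String × List String)) : String :=
  let primary : String :=
    match (PySem.Dict.mk w).get? "roles" with
    | some (r :: _) => PySem.Str.lower r
    | _ => "other"
  if primary ∈ ROLE_ORDER then primary else "other"

-- OrderedDict built from distinct keys: its association list is exactly the generator's list
def group_by_role_alt (workers : List (List (String × List String))) : List (String × List (List (String × List String))) :=
  (ROLE_ORDER ++ ["other"]).map (fun k => (k, workers.filter (fun w => bucketKey w == k)))

-- ===== PRECONDITION & SPEC =====
-- Pre_ excludes workers lacking a "roles" key, on which the Python (both A and B) raises KeyError.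
def Pre_group_by_role (workers : List (List (String × List String))) : Prop :=
  (workers.all (fun w => (PySem.Dict.mk w).contains "roles")) = true
instance (workers : List (List (String × List String))) : Decidable (Pre_group_by_role workers) := by unfold Pre_group_by_role; infer_instance

def pvWitness_group_by_role : (List (List (String × List String))) :=
  [[("roles", ["Tech"]), ("username", ["al"])], [("roles", [])], [("roles", ["boss", "imt"])]]

def Spec_group_by_role (workers : List (List (String × List String))) (out : List (String × List (List (String × List String)))) : Prop := out = group_by_role_alt workers
instance (workers : List (List (String × List String))) (out : List (String × List (List (String × List String)))) : Decidable (Spec_group_by_role workers out) := by unfold Spec_group_by_role; infer_instance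

-- ===== CLAIM (what is proved, stated in full; the proofs are below) =====
def Claim_equal_group_by_role : Prop := ∀ (workers : List (List (String × List String))), Dom_group_by_role workers → Pre_group_by_role workers → Spec_group_by_role workers (group_by_role workers)

-- ===== LEMMAS AND PROOFS =====

def KEYS : List String := ROLE_ORDER ++ ["other"]

theorem bucketKey_mem_KEYS (w : List (String × List String)) : bucketKey w ∈ KEYS := by
  have hb : bucketKey w = if primaryA w ∈ ROLE_ORDER then primaryA w else "other" := rfl
  rw [hb]
  unfold KEYS
  split
  · next h => exact List.mem_append.mpr (Or.inl h)
  · exact List.mem_append.mpr (Or.inr (by simp))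

-- A's dispatch step, on a dict whose keys are exactly KEYS, is a modify at bucketKey w
theorem stepA_eq (b : PySem.Dict String (List (List (String × List String))))
    (hk : b.keys = KEYS) (w : List (String × List String)) :
    (if b.contains (primaryA w) then b.modify (primaryA w) [] (· ++ [w])
     else b.modify "other" [] (· ++ [w])) = b.modify (bucketKey w) [] (· ++ [w]) := by
  have hb : bucketKey w = if primaryA w ∈ ROLE_ORDER then primaryA w else "other" := rfl
  by_cases hc : b.contains (primaryA w) = true
  · have hm : primaryA w ∈ KEYS := hk ▸ (PySem.Dict.contains_iff_mem_keys b (primaryA w)).mp hc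
    rw [if_pos hc, hb]
    by_cases hr : primaryA w ∈ ROLE_ORDER
    · rw [if_pos hr]
    · have : primaryA w = "other" := by
        unfold KEYS at hm; rcases List.mem_append.mp hm with h | h
        · exact absurd h hr
        · simpa using h
      rw [if_neg hr, this]
  · have hm : primaryA w ∉ KEYS := fun h => hc ((PySem.Dict.contains_iff_mem_keys b (primaryA w)).mpr (hk ▸ h))
    have hr : primaryA w ∉ ROLE_ORDER := fun h => hm (by unfold KEYS; exact List.mem_append.mpr (Or.inl h))
    rw [if_neg hc, hb, if_neg hr]

theorem keys_modify_bucket (b : PySem.Dict String (List (List (String × List String))))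
    (hk : b.keys = KEYS) (k : String) (hm : k ∈ KEYS) (f : List (List (String × List String)) → List (List (String × List String))) :
    (b.modify k [] f).keys = KEYS := by
  rw [PySem.Dict.keys_modify,
      PySem.Dict.keys_insert_of_contains b _ ((PySem.Dict.contains_iff_mem_keys b k).mpr (hk ▸ hm)), hk]

-- A's whole loop is a modify-fold keyed by bucketKey
theorem foldA_eq (l : List (List (String × List String)))
    (b : PySem.Dict String (List (List (String × List String)))) (hk : b.keys = KEYS) :
    l.foldl (fun b w =>
      let primary := primaryA w
      if b.contains primary then b.modify primary [] (· ++ [w])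
      else b.modify "other" [] (· ++ [w])) b
    = (l.map (fun w => (bucketKey w, w))).foldl (fun d p => d.modify p.1 [] (· ++ [p.2])) b := by
  induction l generalizing b with
  | nil => rfl
  | cons w l ih =>
      simp only [List.foldl_cons, List.map_cons]
      rw [stepA_eq b hk w, ih _ (keys_modify_bucket b hk _ (bucketKey_mem_KEYS w) _)]

theorem keys_foldA (l : List (List (String × List String)))
    (b : PySem.Dict String (List (List (String × List String)))) (hk : b.keys = KEYS) :
    ((l.map (fun w => (bucketKey w, w))).foldl (fun d p => d.modify p.1 [] (· ++ [p.2])) b).keys = KEYS := by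
  induction l generalizing b with
  | nil => exact hk
  | cons w l ih =>
      simp only [List.map_cons, List.foldl_cons]
      exact ih _ (keys_modify_bucket b hk _ (bucketKey_mem_KEYS w) _)

theorem getD_buckets (workers : List (List (String × List String)))
    (b : PySem.Dict String (List (List (String × List String)))) (k : String) :
    ((workers.map (fun w => (bucketKey w, w))).foldl (fun d p => d.modify p.1 [] (· ++ [p.2])) b).getD k []
    = b.getD k [] ++ workers.filter (fun w => bucketKey w == k) := by
  rw [PySem.Dict.getD_foldl_modify_append]
  congr 1
  rw [List.filter_map, List.map_map]
  simp only [Function.comp_def]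
  simp

-- ===== VERDICT (by name: the statement is the Claim_ definition above) =====
theorem group_by_role_spec : Claim_equal_group_by_role := by
  intro workers _ _
  unfold Spec_group_by_role group_by_role
  show (workers.foldl (fun b w =>
      if b.contains (primaryA w) then b.modify (primaryA w) [] (· ++ [w])
      else b.modify "other" [] (· ++ [w]))
      ((PySem.Dict.ofList (ROLE_ORDER.map (fun r => (r, ([] : List (List (String × List String))))))).insert "other" [])).items
    = group_by_role_alt workers
  have hk0 : ((PySem.Dict.ofList (ROLE_ORDER.map (fun r => (r, ([] : List (List (String × List String))))))).insert "other" []).keys = KEYS := by decide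
  rw [foldA_eq workers _ hk0]
  rw [PySem.Dict.items_eq_map_keys _ (by rw [keys_foldA workers _ hk0]; decide) []]
  rw [keys_foldA workers _ hk0]
  unfold group_by_role_alt
  have hK : KEYS = ROLE_ORDER ++ ["other"] := rfl
  rw [← hK]
  apply List.map_congr_left
  intro k hkm
  rw [getD_buckets workers _ k]
  congr 1
  fin_cases hkm <;> rfl
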